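-- pv_equiv track=rewrite | github.com/ethereum-optimism/op-analytics | helper_functions/evm_utils.py | count_calldata_gas
-- ===== SOURCE A (Python) =====
-- def count_calldata_gas(input_data):
--     # Remove the '0x' prefix
--     input_data = input_data[2:]
--
--     # Calculate gas usage
--     gas_usage = 0
--     for i in range(0, len(input_data), 2):
--         if input_data[i:i+2] == '00':
--             gas_usage += 4
--         else:
--             gas_usage += 16
--
--     return gas_usage
-- ===== SOURCE B (Python) =====
-- def count_calldata_gas(input_data):
--     # Divide and conquer: recursively split the stripped data at an even
--     # boundary and sum the two halves' costs; base cases are the empty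
--     # string (0), one 2-char chunk ('00' -> 4, else 16) and a lone
--     # trailing character (16).
--     def cost(s):
--         n = len(s)
--         if n <= 2:
--             return 0 if n == 0 else (4 if s == '00' else 16)
--         m = n // 2
--         if m % 2:
--             m += 1
--         return cost(s[:m]) + cost(s[m:])
--     return cost(input_data[2:])
-- ===== Notes on version B (the rewrite author's own statement) =====
-- stated objective: alternative
-- what changed: B replaces A's left-to-right indexed scan (range(0,len,2) with a slice-and-branch accumulator) by a divide-and-conquer recursion: split the stripped data at an even boundary, recurse on both halves and sum, with base cases empty=0, a 2-char chunk ('00'->4 else 16) and a lone trailing char (16); correctness rests on the per-chunk cost being additive over even-length splits.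
import Mathlib
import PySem

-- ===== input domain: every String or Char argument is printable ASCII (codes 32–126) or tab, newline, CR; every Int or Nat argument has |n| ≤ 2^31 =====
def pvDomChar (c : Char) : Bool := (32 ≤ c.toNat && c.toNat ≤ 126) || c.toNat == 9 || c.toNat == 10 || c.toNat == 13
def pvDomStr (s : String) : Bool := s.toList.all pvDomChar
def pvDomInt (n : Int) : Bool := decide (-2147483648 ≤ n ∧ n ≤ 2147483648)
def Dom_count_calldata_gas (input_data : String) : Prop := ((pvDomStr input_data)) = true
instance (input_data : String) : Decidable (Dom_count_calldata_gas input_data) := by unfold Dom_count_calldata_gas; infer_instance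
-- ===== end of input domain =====

-- B computes the same calldata gas by divide-and-conquer (split at an even
-- boundary, recurse, sum) instead of A's indexed left-to-right scan
-- (objective: alternative algorithm, same cost).

-- ===== PORT A =====
def count_calldata_gas (input_data : String) : Int :=
  -- input_data = input_data[2:]
  let data := PySem.List.slice input_data.toList (some 2) none
  -- for i in range(0, len(input_data), 2): if input_data[i:i+2] == '00' …
  (PySem.List.pyRange 0 (PySem.List.len data) 2).foldl
    (fun gas_usage i =>
      if PySem.List.slice data (some i) (some (i + 2)) = ['0', '0'] then gas_usage + 4
      else gas_usage + 16) 0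

-- ===== PORT B =====
-- cost(s): divide and conquer over the char list (Source B's inner helper)
def pvCost (s : List Char) : Int :=
  if s.length ≤ 2 then
    if s.length = 0 then 0 else if s = ['0', '0'] then 4 else 16
  else
    let m := if (s.length / 2) % 2 = 1 then s.length / 2 + 1 else s.length / 2
    pvCost (s.take m) + pvCost (s.drop m)
termination_by s.length
decreasing_by
  all_goals simp only [List.length_take, List.length_drop]
  all_goals split_ifs <;> omega

def count_calldata_gas_alt (input_data : String) : Int :=
  pvCost (PySem.List.slice input_data.toList (some 2) none)

-- ===== PRECONDITION & SPEC =====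
def Spec_count_calldata_gas (input_data : String) (out : Int) : Prop := out = count_calldata_gas_alt input_data
instance (input_data : String) (out : Int) : Decidable (Spec_count_calldata_gas input_data out) := by unfold Spec_count_calldata_gas; infer_instance

-- ===== CLAIM (what is proved, stated in full; the proofs are below) =====
def Claim_equal_count_calldata_gas : Prop := ∀ (input_data : String), Dom_count_calldata_gas input_data → Spec_count_calldata_gas input_data (count_calldata_gas input_data)

-- ===== LEMMAS AND PROOFS =====

-- reference cost: two characters at a time (proof-only bridge between A and B)
def gspec : List Char → Int
  | [] => 0
  | [_] => 16
  | a :: b :: r => (if a = '0' ∧ b = '0' then 4 else 16) + gspec r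

-- induction on a list two elements at a time
theorem twoStep {P : List Char → Prop} (h0 : P []) (h1 : ∀ c, P [c])
    (h2 : ∀ c1 c2 rest, P rest → P (c1 :: c2 :: rest)) : ∀ cs, P cs
  | [] => h0
  | [c] => h1 c
  | c1 :: c2 :: rest => h2 c1 c2 rest (twoStep h0 h1 h2 rest)

-- A's fold computes gspec
theorem key (cs : List Char) : ∀ g : Int,
    (List.range ((cs.length + 1) / 2)).foldl
      (fun gas k => if (cs.drop (2 * k)).take 2 = ['0', '0'] then gas + 4 else gas + 16) g
    = g + gspec cs := by
  induction cs using twoStep with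
  | h0 => intro g; simp [gspec]
  | h1 c => intro g; simp [gspec, List.range_succ]
  | h2 c1 c2 rest ih =>
      intro g
      have hm : ((c1 :: c2 :: rest).length + 1) / 2 = ((rest.length + 1) / 2) + 1 := by
        simp [List.length_cons]; omega
      rw [hm, List.range_succ_eq_map, List.foldl_cons, List.foldl_map]
      have hbody : (fun (gas : Int) (k : Nat) =>
            if ((c1 :: c2 :: rest).drop (2 * (k + 1))).take 2 = ['0', '0'] then gas + 4
            else gas + 16)
          = fun gas k => if (rest.drop (2 * k)).take 2 = ['0', '0'] then gas + 4 else gas + 16 := by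
        funext gas k
        have h2k : 2 * (k + 1) = 2 * k + 1 + 1 := by ring
        rw [h2k, List.drop_succ_cons, List.drop_succ_cons]
      simp only [Nat.mul_zero, List.drop_zero] at *
      rw [show ∀ gas : Int, (List.range ((rest.length + 1) / 2)).foldl
            (fun gas k => if ((c1 :: c2 :: rest).drop (2 * (k + 1))).take 2 = ['0', '0']
              then gas + 4 else gas + 16) gas
          = (List.range ((rest.length + 1) / 2)).foldl
            (fun gas k => if (rest.drop (2 * k)).take 2 = ['0', '0'] then gas + 4 else gas + 16) gas
        from fun gas => by rw [hbody]]
      rw [ih]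
      by_cases hc : c1 = '0' ∧ c2 = '0'
      · have : (c1 :: c2 :: rest).take 2 = ['0', '0'] := by simp [hc.1, hc.2]
        simp only [this]; simp [gspec, hc]; ring
      · have : ¬ (c1 :: c2 :: rest).take 2 = ['0', '0'] := by
          simp only [List.take]
          intro h
          exact hc ⟨by injection h, by injection (by injection h : c2 :: [] = '0' :: [])⟩
        simp only [this]; simp [gspec, hc]; ring

-- gspec is additive across an even-length split
theorem gspec_append (s t : List Char) (hs : s.length % 2 = 0) :
    gspec (s ++ t) = gspec s + gspec t := by
  induction s using twoStep with
  | h0 => simp [gspec]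
  | h1 c => simp at hs
  | h2 c1 c2 rest ih =>
      have hr : rest.length % 2 = 0 := by simp [List.length_cons] at hs; omega
      simp only [List.cons_append, gspec, ih hr]; ring


-- B's recursion agrees with gspec, by strong induction on length
theorem pvCost_bounded : ∀ (n : Nat) (s : List Char), s.length ≤ n → pvCost s = gspec s := by
  intro n
  induction n with
  | zero =>
      intro s h
      have : s = [] := List.length_eq_zero_iff.mp (Nat.le_zero.mp h)
      subst this; simp [pvCost, gspec]
  | succ n ih =>
      intro s h
      rw [pvCost]
      by_cases hle : s.length ≤ 2
      · rw [if_pos hle]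
        match s, hle with
        | [], _ => simp [gspec]
        | [c], _ => simp [gspec]
        | [a, b], _ =>
            by_cases hc : a = '0' ∧ b = '0'
            · obtain ⟨rfl, rfl⟩ := hc; simp [gspec]
            · have hne : [a, b] ≠ ['0', '0'] := by
                intro he
                exact hc ⟨by injection he, by injection (by injection he : [b] = ['0'])⟩
              simp [gspec, hne]
              rintro rfl rfl; exact hc ⟨rfl, rfl⟩
      · rw [if_neg hle]
        push Not at hle
        set m := if (s.length / 2) % 2 = 1 then s.length / 2 + 1 else s.length / 2 with hm
        have hm1 : 1 ≤ m ∧ m < s.length ∧ m % 2 = 0 := by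
          rw [hm]; split_ifs with hh <;> omega
        have h1 : (s.take m).length ≤ n := by rw [List.length_take]; omega
        have h2 : (s.drop m).length ≤ n := by rw [List.length_drop]; omega
        have ht : (s.take m).length % 2 = 0 := by rw [List.length_take]; omega
        show pvCost (s.take m) + pvCost (s.drop m) = gspec s
        rw [ih _ h1, ih _ h2, ← gspec_append _ _ ht, List.take_append_drop]


-- B's divide-and-conquer computes gspec
theorem pvCost_eq_gspec (s : List Char) : pvCost s = gspec s :=
  pvCost_bounded s.length s le_rfl

-- ===== VERDICT (by name: the statement is the Claim_ definition above) =====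
theorem count_calldata_gas_spec : Claim_equal_count_calldata_gas := by
  intro s _
  unfold Spec_count_calldata_gas count_calldata_gas count_calldata_gas_alt
  dsimp only
  generalize PySem.List.slice s.toList (some 2) none = data
  rw [PySem.List.len_eq]
  rw [PySem.List.pyRange_of_pos 0 (data.length : Int) (by norm_num)]
  have hcount : (if (0 : Int) < (data.length : Int)
      then (((data.length : Int) - 0 + 2 - 1) / 2).toNat else 0) = (data.length + 1) / 2 := by
    split_ifs with h <;> omega
  rw [hcount, List.foldl_map]
  have hbody : (fun (gas : Int) (k : Nat) =>
        if PySem.List.slice data (some (0 + 2 * (k : Int))) (some (0 + 2 * (k : Int) + 2)) = ['0', '0']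
        then gas + 4 else gas + 16)
      = fun gas k => if (data.drop (2 * k)).take 2 = ['0', '0'] then gas + 4 else gas + 16 := by
    funext gas k
    have h1 : (0 : Int) + 2 * (k : Int) = ((2 * k : Nat) : Int) := by push_cast; ring
    rw [h1]
    rw [show ((2 * k : Nat) : Int) + 2 = ((2 * k : Nat) : Int) + ((2 : Nat) : Int) by norm_num,
      PySem.List.slice_natCast_add]
  rw [hbody, key data 0, pvCost_eq_gspec]; ring
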